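-- pv_equiv track=rewrite | github.com/SmeagolDanger/swg-loadout | backend/calculations.py | _find_last_cm_index
-- ===== SOURCE A (Python) =====
-- from typing import Any
--
-- def _find_last_cm_index(components: dict[str, Any]) -> int:
--     """Find the index of the countermeasure that is the 'last loaded' weapon slot.
--
--     FIX: In Seraph, the code reverses the slot list and finds the first CM
--     that appears before any non-null component. If a CM is the very last
--     loaded slot, its drain is reduced to 1/10.
--
--     Returns the 1-based slot index (1-8) of the last-loaded CM, or 0 if none.
--     """
--     comp_types = []
--     for i in range(1, 9):
--         slot = components.get(f"slot{i}", {})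
--         if slot and slot.get("comp_type"):
--             comp_types.append(slot["comp_type"])
--         else:
--             comp_types.append("Null")
--
--     # Reverse and find first CM before any non-null component
--     comp_types_rev = list(reversed(comp_types))
--     cm_index = 0
--     for i, ct in enumerate(comp_types_rev):
--         if ct == "countermeasure":
--             cm_index = 8 - i  # Convert back to 1-based forward index
--             break
--         if ct != "Null":
--             cm_index = 0
--             break
--
--     return cm_index
-- ===== SOURCE B (Python) =====
-- def _find_last_cm_index(components):
--     """Scan slots 8..1 directly; the last-loaded slot decides immediately."""
--     for i in range(8, 0, -1):
--         slot = components.get(f"slot{i}", {})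
--         ct = slot.get("comp_type") if slot else None
--         if ct and ct != "Null":
--             return i if ct == "countermeasure" else 0
--     return 0
-- ===== Notes on version B (the rewrite author's own statement) =====
-- stated objective: simpler
-- what changed: B drops the intermediate 8-element comp_types list, the reversal and the enumerate scan; it loops straight down from slot 8 to slot 1 and returns as soon as it meets a loaded slot (treating the game's 'Null' comp_type as unloaded, as A's sentinel does).
import Mathlib
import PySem

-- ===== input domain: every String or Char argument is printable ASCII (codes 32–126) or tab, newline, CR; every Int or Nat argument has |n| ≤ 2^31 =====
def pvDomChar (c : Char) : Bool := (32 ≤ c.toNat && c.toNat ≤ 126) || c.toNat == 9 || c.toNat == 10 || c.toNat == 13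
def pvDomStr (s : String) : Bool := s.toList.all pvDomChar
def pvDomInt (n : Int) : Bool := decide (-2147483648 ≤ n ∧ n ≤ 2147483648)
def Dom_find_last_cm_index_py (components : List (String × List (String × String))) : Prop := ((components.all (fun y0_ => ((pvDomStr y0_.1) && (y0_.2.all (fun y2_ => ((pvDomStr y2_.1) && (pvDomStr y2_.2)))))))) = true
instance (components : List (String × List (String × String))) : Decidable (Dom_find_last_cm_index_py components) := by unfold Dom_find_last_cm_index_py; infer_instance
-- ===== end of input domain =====

-- B replaces A's build-list / reverse / enumerate-scan with one early-exit backward loop over slots 8..1 (simpler; return value only, neither mutates).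

-- ===== PORT A =====
-- the reverse-enumerate loop with its two breaks (falling off the end leaves cm_index = 0)
def cmScan : List (Int × String) → Int
  | [] => 0
  | (i, ct) :: rest =>
    if ct = "countermeasure" then 8 - i
    else if ct ≠ "Null" then 0
    else cmScan rest

def find_last_cm_index_py (components : List (String × List (String × String))) : Int :=
  let comp_types : List String := (PySem.List.pyRange 1 9 1).foldl (fun acc i =>
    let slot := (PySem.Dict.mk components).getD ("slot" ++ PySem.Int.toStr i) []
    if slot ≠ [] ∧ (PySem.Dict.mk slot).getD "comp_type" "" ≠ "" then
      acc ++ [(PySem.Dict.mk slot).getD "comp_type" ""]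
    else acc ++ ["Null"]) []
  let comp_types_rev := comp_types.reverse
  cmScan (PySem.List.enumerate comp_types_rev)

-- ===== PORT B =====
-- Python's None (unloaded slot) is ported as "": ct is only tested for truthiness and compared with nonempty literals, where "" and None coincide
def altScan (components : List (String × List (String × String))) : List Int → Int
  | [] => 0
  | i :: rest =>
    let slot := (PySem.Dict.mk components).getD ("slot" ++ PySem.Int.toStr i) []
    let ct := if slot ≠ [] then (PySem.Dict.mk slot).getD "comp_type" "" else ""
    if ct ≠ "" ∧ ct ≠ "Null" then (if ct = "countermeasure" then i else 0)
    else altScan components rest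

def find_last_cm_index_py_alt (components : List (String × List (String × String))) : Int :=
  altScan components (PySem.List.pyRange 8 0 (-1))

-- ===== PRECONDITION & SPEC =====
def Spec_find_last_cm_index_py (components : List (String × List (String × String))) (out : Int) : Prop := out = find_last_cm_index_py_alt components
instance (components : List (String × List (String × String))) (out : Int) : Decidable (Spec_find_last_cm_index_py components out) := by unfold Spec_find_last_cm_index_py; infer_instance

-- ===== CLAIM (what is proved, stated in full; the proofs are below) =====
def Claim_equal_find_last_cm_index_py : Prop := ∀ (components : List (String × List (String × String))), Dom_find_last_cm_index_py components → Spec_find_last_cm_index_py components (find_last_cm_index_py components)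

-- ===== LEMMAS AND PROOFS =====

-- the effective ("Null"-ified) component type of slot i, as A records it in comp_types
def tOf (c : List (String × List (String × String))) (i : Int) : String :=
  let slot := (PySem.Dict.mk c).getD ("slot" ++ PySem.Int.toStr i) []
  if slot ≠ [] ∧ (PySem.Dict.mk slot).getD "comp_type" "" ≠ "" then
    (PySem.Dict.mk slot).getD "comp_type" ""
  else "Null"

-- one step of B's loop, phrased through tOf: B fires exactly when the slot's effective type is not "Null"
lemma altStep (c : List (String × List (String × String))) (i : Int) (r : List Int) :
    altScan c (i :: r) =
      if tOf c i = "countermeasure" then i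
      else if tOf c i ≠ "Null" then 0
      else altScan c r := by
  simp only [altScan, tOf]
  by_cases h1 : (PySem.Dict.mk c).getD ("slot" ++ PySem.Int.toStr i) [] = []
  · simp [h1]
  · by_cases h2 : (PySem.Dict.mk ((PySem.Dict.mk c).getD ("slot" ++ PySem.Int.toStr i) [])).getD "comp_type" "" = ""
    · simp [h1, h2]
    · by_cases h3 : (PySem.Dict.mk ((PySem.Dict.mk c).getD ("slot" ++ PySem.Int.toStr i) [])).getD "comp_type" "" = "Null"
      · simp [h1, h3]
      · by_cases h4 : (PySem.Dict.mk ((PySem.Dict.mk c).getD ("slot" ++ PySem.Int.toStr i) [])).getD "comp_type" "" = "countermeasure"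
        · simp [h1, h4]
        · simp [h1, h2, h3, h4]

-- A's fold step writes exactly tOf c i
lemma foldStep (c : List (String × List (String × String))) :
    (fun (acc : List String) (i : Int) =>
      let slot := (PySem.Dict.mk c).getD ("slot" ++ PySem.Int.toStr i) []
      if slot ≠ [] ∧ (PySem.Dict.mk slot).getD "comp_type" "" ≠ "" then
        acc ++ [(PySem.Dict.mk slot).getD "comp_type" ""]
      else acc ++ ["Null"]) = (fun acc i => acc ++ [tOf c i]) := by
  funext acc i
  dsimp only [tOf]
  split_ifs with h <;> rfl

lemma main_eq (c : List (String × List (String × String))) :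
    find_last_cm_index_py c = find_last_cm_index_py_alt c := by
  have hr1 : PySem.List.pyRange 1 9 1 = [1, 2, 3, 4, 5, 6, 7, 8] := by decide
  have hr2 : PySem.List.pyRange 8 0 (-1) = [8, 7, 6, 5, 4, 3, 2, 1] := by decide
  unfold find_last_cm_index_py find_last_cm_index_py_alt
  rw [hr1, hr2, foldStep c]
  simp only [List.foldl, List.nil_append, List.cons_append,
    List.reverse_cons, List.reverse_nil, PySem.List.enumerate_cons, PySem.List.enumerate_nil,
    cmScan, altStep]
  norm_num [altScan]

-- ===== VERDICT (by name: the statement is the Claim_ definition above) =====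
theorem find_last_cm_index_py_spec : Claim_equal_find_last_cm_index_py := by
  intro c _
  exact main_eq c
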